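-- pv_equiv track=rewrite | github.com/twoju/Algorithm | Programmers/python3/lv.01/폰켓몬.py | solution
-- ===== SOURCE A (Python) =====
-- def solution(nums):
--     # 최대 N/2 만큼 가능
--     max_answer = int(len(nums)/2)
--
--     # 다른 종류의 폰켓몬이 얼마나 있는지 중복 검사하기 위한 mons
--     mons = []
--     # nums 가 빌 때까지 반복
--     while nums:
--         # mons에 포함된 종류는 제외하기
--         nums = [n for n in nums if n not in mons]
--         for i in nums:
--             if i not in mons:
--                 mons.append(i)
--
--     # 최대 데려갈 수 있는 수를 넘는지 아닌지 확인
--     if len(mons) >= max_answer: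
--         answer = max_answer
--     else:
--         answer = len(mons)
--     return answer
-- ===== SOURCE B (Python) =====
-- def solution(nums):
--     half = len(nums) // 2
--     s = sorted(nums)
--     distinct = 0
--     if s:
--         distinct = 1 + sum(1 for a, b in zip(s, s[1:]) if a != b)
--     return min(half, distinct)
-- ===== Notes on version B (the rewrite author's own statement) =====
-- stated objective: faster
-- what changed: replaces A's repeated while-loop membership scans over a growing 'mons' list with sort-then-one-pass counting of adjacent differences, capped by len//2 via min
import Mathlib
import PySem

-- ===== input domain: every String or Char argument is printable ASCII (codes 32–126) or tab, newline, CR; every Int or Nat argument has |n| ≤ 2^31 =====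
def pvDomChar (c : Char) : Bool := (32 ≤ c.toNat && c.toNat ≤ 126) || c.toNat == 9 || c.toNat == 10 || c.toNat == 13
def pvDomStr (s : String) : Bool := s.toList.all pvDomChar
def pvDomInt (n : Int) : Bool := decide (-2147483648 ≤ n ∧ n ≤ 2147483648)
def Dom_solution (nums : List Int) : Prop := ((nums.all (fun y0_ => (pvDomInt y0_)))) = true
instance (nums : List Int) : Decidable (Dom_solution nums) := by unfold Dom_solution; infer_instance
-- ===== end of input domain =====

-- B replaces A's while-loop of repeated membership scans by sort-then-one-pass adjacent counting (objective: faster).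

-- ===== PORT A =====
-- the 'for i in nums: if i not in mons: mons.append(i)' inner loop
def pvAppendDistinct (mons : List Int) (nums : List Int) : List Int :=
  nums.foldl (fun m i => if m.contains i then m else m ++ [i]) mons

-- the 'while nums:' loop; fuel = len(nums)+2 suffices (proved below: the body empties nums after one pass)
def pvWhile : Nat → List Int → List Int → List Int
  | 0, _, mons => mons
  | fuel + 1, nums, mons =>
    if nums.isEmpty then mons
    else
      let nums' := nums.filter (fun n => !mons.contains n)
      let mons' := pvAppendDistinct mons nums'
      pvWhile fuel nums' mons'

def solution (nums : List Int) : Int :=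
  let maxAnswer : Int := ((nums.length / 2 : Nat) : Int)  -- int(len(nums)/2), exact here
  let mons := pvWhile (nums.length + 2) nums []
  if (mons.length : Int) ≥ maxAnswer then maxAnswer else (mons.length : Int)

-- ===== PORT B =====
def solution_alt (nums : List Int) : Int :=
  let half : Int := ((nums.length / 2 : Nat) : Int)
  let s := PySem.List.sorted nums (fun x => x) false
  let distinct : Int :=
    if s.isEmpty then 0
    else 1 + ((s.zip (PySem.List.slice s (some 1) none)).map
                (fun p => if p.1 ≠ p.2 then (1 : Int) else 0)).sum
  min half distinct

-- ===== PRECONDITION & SPEC =====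
def Spec_solution (nums : List Int) (out : Int) : Prop := out = solution_alt nums
instance (nums : List Int) (out : Int) : Decidable (Spec_solution nums out) := by unfold Spec_solution; infer_instance

-- ===== CLAIM (what is proved, stated in full; the proofs are below) =====
def Claim_equal_solution : Prop := ∀ (nums : List Int), Dom_solution nums → Spec_solution nums (solution nums)

-- ===== LEMMAS AND PROOFS =====

theorem pvAppendDistinct_cons (mons : List Int) (a : Int) (t : List Int) :
    pvAppendDistinct mons (a :: t)
      = pvAppendDistinct (if mons.contains a then mons else mons ++ [a]) t := rfl

theorem mem_pvAppendDistinct (mons l : List Int) (x : Int) :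
    x ∈ pvAppendDistinct mons l ↔ x ∈ mons ∨ x ∈ l := by
  induction l generalizing mons with
  | nil => simp [pvAppendDistinct]
  | cons a t ih =>
    rw [pvAppendDistinct_cons, ih]
    by_cases h : a ∈ mons
    · rw [if_pos (by simpa using h)]
      constructor
      · rintro (hm | ht)
        · exact Or.inl hm
        · exact Or.inr (List.mem_cons_of_mem a ht)
      · rintro (hm | ht)
        · exact Or.inl hm
        · rcases List.mem_cons.mp ht with rfl | ht
          · exact Or.inl h
          · exact Or.inr ht
    · rw [if_neg (by simpa using h)]
      simp only [List.mem_append, List.mem_cons]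
      tauto

theorem nodup_pvAppendDistinct (mons l : List Int) (h : mons.Nodup) :
    (pvAppendDistinct mons l).Nodup := by
  induction l generalizing mons with
  | nil => simpa [pvAppendDistinct] using h
  | cons a t ih =>
    rw [pvAppendDistinct_cons]
    by_cases hc : a ∈ mons
    · simpa [hc] using ih mons h
    · have hnd : (mons ++ [a]).Nodup := by
        rw [List.nodup_append]
        refine ⟨h, by simp, ?_⟩
        intro y hy b hb
        rw [List.mem_singleton.mp hb]
        exact fun hya => hc (hya ▸ hy)
      simpa [hc] using ih (mons ++ [a]) hnd

theorem pvWhile_nil (fuel : Nat) (mons : List Int) : pvWhile fuel [] mons = mons := by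
  cases fuel <;> simp [pvWhile]

theorem pvWhile_succ (fuel : Nat) (a : Int) (t : List Int) (mons : List Int) :
    pvWhile (fuel + 1) (a :: t) mons
      = pvWhile fuel ((a :: t).filter (fun n => !mons.contains n))
          (pvAppendDistinct mons ((a :: t).filter (fun n => !mons.contains n))) := rfl

theorem pvWhile_run (nums : List Int) (h : nums ≠ []) :
    pvWhile (nums.length + 2) nums [] = pvAppendDistinct [] nums := by
  obtain ⟨a, t, rfl⟩ := List.exists_cons_of_ne_nil h
  have hfilter1 : (a :: t).filter (fun n => !(List.contains ([] : List Int) n)) = a :: t := by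
    simp
  have hfilter2 :
      (a :: t).filter (fun n => !((pvAppendDistinct [] (a :: t)).contains n)) = [] := by
    apply List.filter_eq_nil_iff.mpr
    intro x hx
    simp [mem_pvAppendDistinct, hx]
  have h2 : (a :: t).length + 2 = ((a :: t).length + 1) + 1 := rfl
  rw [h2, pvWhile_succ, hfilter1, pvWhile_succ, hfilter2]
  rw [show pvAppendDistinct (pvAppendDistinct [] (a :: t)) [] = pvAppendDistinct [] (a :: t) from rfl]
  exact pvWhile_nil _ _

theorem pvAppendDistinct_card (nums : List Int) :
    (pvAppendDistinct [] nums).length = nums.toFinset.card := by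
  have hnd : (pvAppendDistinct [] nums).Nodup := nodup_pvAppendDistinct [] nums (by simp)
  have hfs : (pvAppendDistinct [] nums).toFinset = nums.toFinset := by
    ext x
    simp [List.mem_toFinset, mem_pvAppendDistinct]
  rw [← List.toFinset_card_of_nodup hnd, hfs]

-- B's adjacent-difference count on a ≤-sorted list is the number of distinct elements
theorem adj_count_sorted (a : Int) (t : List Int)
    (h : (a :: t).Pairwise (· ≤ ·)) :
    1 + (((a :: t).zip t).map (fun p => if p.1 ≠ p.2 then (1 : Int) else 0)).sum
      = ((a :: t).toFinset.card : Int) := by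
  induction t generalizing a with
  | nil => simp
  | cons b t' ih =>
    have hab : a ≤ b := (List.pairwise_cons.mp h).1 b (by simp)
    have htail : (b :: t').Pairwise (· ≤ ·) := (List.pairwise_cons.mp h).2
    have hrec := ih b htail
    simp only [List.zip_cons_cons, List.map_cons, List.sum_cons]
    by_cases hne : a = b
    · subst hne
      have hts : ((a :: a :: t').toFinset) = ((a :: t').toFinset) := by simp
      simp only [ne_eq, not_true_eq_false, if_neg, not_false_eq_true]
      rw [hts, ← hrec]; ring
    · have hnotin : a ∉ (b :: t').toFinset := by
        simp only [List.mem_toFinset, List.mem_cons]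
        rintro (rfl | hx)
        · exact hne rfl
        · have hb : b ≤ a := List.rel_of_pairwise_cons htail hx
          exact hne (le_antisymm hab hb)
      simp only [ne_eq, hne, not_false_eq_true, if_pos]
      have hcard : ((a :: b :: t').toFinset.card : Int)
          = 1 + ((b :: t').toFinset.card : Int) := by
        rw [List.toFinset_cons, Finset.card_insert_of_notMem hnotin]
        push_cast
        ring
      rw [hcard, ← hrec]

theorem solution_alt_eq_min (nums : List Int) :
    solution_alt nums
      = min ((nums.length / 2 : Nat) : Int) ((nums.toFinset.card : Int)) := by
  rcases hs : PySem.List.sorted nums (fun x => x) false with _ | ⟨a, t⟩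
  · have hnil : nums = [] := by
      have hp := PySem.List.sorted_perm nums (fun x => x) false
      rw [hs] at hp
      exact hp.symm.eq_nil
    subst hnil
    simp [solution_alt, hs]
  · have hperm : (a :: t).Perm nums := by
      have hp := PySem.List.sorted_perm nums (fun x => x) false
      rwa [hs] at hp
    have hpair : (a :: t).Pairwise (· ≤ ·) := by
      have hp := PySem.List.sorted_pairwise nums (fun x => x)
      rwa [hs] at hp
    have hslice : PySem.List.slice (a :: t) (some 1) none = t := by
      have := PySem.List.slice_from_one (a :: t)
      simpa using this
    have hadj := adj_count_sorted a t hpair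
    simp only [solution_alt, hs, hslice, List.isEmpty_cons, Bool.false_eq_true, if_false,
      hadj, List.toFinset_eq_of_perm _ _ hperm]

theorem solution_eq_min (nums : List Int) :
    solution nums
      = min ((nums.length / 2 : Nat) : Int) ((nums.toFinset.card : Int)) := by
  rcases eq_or_ne nums [] with rfl | h
  · simp [solution, pvWhile_nil]
  · simp only [solution, pvWhile_run nums h, pvAppendDistinct_card]
    rcases le_or_gt ((nums.length / 2 : Nat) : Int) ((nums.toFinset.card : Int)) with hle | hlt
    · rw [if_pos hle, min_eq_left hle]
    · rw [if_neg (by omega), min_eq_right (by omega)]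

-- ===== VERDICT (by name: the statement is the Claim_ definition above) =====
theorem solution_spec : Claim_equal_solution := by
  intro nums _
  unfold Spec_solution
  rw [solution_eq_min, solution_alt_eq_min]
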